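-- pv_equiv track=rewrite | github.com/Tracardi/reek | main.py | check_disallowed
-- ===== SOURCE A (Python) =====
-- from typing import List
--
-- def check_disallowed(file: str, current_file_module_name: str, namespace, imports, disallowed) -> List[str]:
--     not_allowed = []
--
--     for _disallowed in disallowed:
--         if not current_file_module_name.startswith(_disallowed):
--             continue
--
--         for _import in imports:
--             if _import.startswith(namespace):
--                 not_allowed.append(file)
--
--     return not_allowed
-- ===== SOURCE B (Python) =====
-- from typing import List
--
-- def check_disallowed(file: str, current_file_module_name: str, namespace, imports, disallowed) -> List[str]:
--     d = sum(1 for x in disallowed if current_file_module_name.startswith(x))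
--     i = sum(1 for x in imports if x.startswith(namespace))
--     return [file] * (d * i)
-- ===== Notes on version B (the rewrite author's own statement) =====
-- stated objective: faster
-- what changed: Instead of a nested loop appending the file once per matching disallowed x import pair, B counts matching disallowed prefixes and matching imports in two independent passes and returns the file replicated count_d * count_i times.
import Mathlib
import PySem

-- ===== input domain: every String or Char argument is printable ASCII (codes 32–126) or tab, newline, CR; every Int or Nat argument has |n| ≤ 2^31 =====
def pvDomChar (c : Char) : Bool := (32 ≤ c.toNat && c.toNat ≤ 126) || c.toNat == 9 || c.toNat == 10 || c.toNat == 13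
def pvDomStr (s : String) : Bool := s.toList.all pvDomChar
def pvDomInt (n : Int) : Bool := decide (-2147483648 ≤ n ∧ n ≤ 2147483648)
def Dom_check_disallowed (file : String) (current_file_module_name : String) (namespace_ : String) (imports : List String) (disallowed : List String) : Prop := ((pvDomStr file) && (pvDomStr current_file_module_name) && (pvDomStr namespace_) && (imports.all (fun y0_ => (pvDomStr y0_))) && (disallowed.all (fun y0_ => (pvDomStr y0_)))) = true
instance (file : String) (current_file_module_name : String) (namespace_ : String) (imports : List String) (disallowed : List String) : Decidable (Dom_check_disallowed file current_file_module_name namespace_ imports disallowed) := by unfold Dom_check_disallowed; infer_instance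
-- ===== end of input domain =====

-- B replaces A's nested appending loops by two independent counts and one replication (faster: O(D+I) vs O(D*I)).

-- ===== PORT A =====
def check_disallowed (file : String) (current_file_module_name : String) (namespace_ : String) (imports : List String) (disallowed : List String) : List String :=
  disallowed.foldl (fun not_allowed _disallowed =>
    if ¬ (PySem.Str.startswith current_file_module_name _disallowed) then
      not_allowed
    else
      imports.foldl (fun acc _import =>
        if PySem.Str.startswith _import namespace_ then acc ++ [file] else acc) not_allowed) []

-- ===== PORT B =====
def check_disallowed_alt (file : String) (current_file_module_name : String) (namespace_ : String) (imports : List String) (disallowed : List String) : List String :=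
  let d := disallowed.countP (fun x => PySem.Str.startswith current_file_module_name x)
  let i := imports.countP (fun x => PySem.Str.startswith x namespace_)
  List.replicate (d * i) file

-- ===== PRECONDITION & SPEC =====
def Spec_check_disallowed (file : String) (current_file_module_name : String) (namespace_ : String) (imports : List String) (disallowed : List String) (out : List String) : Prop := out = check_disallowed_alt file current_file_module_name namespace_ imports disallowed
instance (file : String) (current_file_module_name : String) (namespace_ : String) (imports : List String) (disallowed : List String) (out : List String) : Decidable (Spec_check_disallowed file current_file_module_name namespace_ imports disallowed out) := by unfold Spec_check_disallowed; infer_instance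

-- ===== CLAIM (what is proved, stated in full; the proofs are below) =====
def Claim_equal_check_disallowed : Prop := ∀ (file : String) (current_file_module_name : String) (namespace_ : String) (imports : List String) (disallowed : List String), Dom_check_disallowed file current_file_module_name namespace_ imports disallowed → Spec_check_disallowed file current_file_module_name namespace_ imports disallowed (check_disallowed file current_file_module_name namespace_ imports disallowed)

-- ===== LEMMAS AND PROOFS =====

-- A's inner loop appends `file` once per import matching the namespace.
theorem inner_foldl_eq (file namespace_ : String) (imports : List String) (acc : List String) :
    imports.foldl (fun acc _import =>
        if PySem.Str.startswith _import namespace_ then acc ++ [file] else acc) acc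
      = acc ++ List.replicate (imports.countP (fun x => PySem.Str.startswith x namespace_)) file := by
  induction imports generalizing acc with
  | nil => simp
  | cons hd tl ih =>
    simp only [List.foldl_cons, List.countP_cons]
    by_cases h : PySem.Str.startswith hd namespace_
    · rw [if_pos h, ih, List.append_assoc]
      simp only [h, if_true]
      rfl
    · rw [if_neg h, ih]
      simp only [h, Bool.false_eq_true, if_false, Nat.add_zero]

-- A's outer loop therefore appends `i` copies of `file` once per matching disallowed prefix.
theorem outer_foldl_eq (file current_file_module_name namespace_ : String) (imports disallowed : List String) (acc : List String) :
    disallowed.foldl (fun not_allowed _disallowed =>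
      if ¬ (PySem.Str.startswith current_file_module_name _disallowed) then
        not_allowed
      else
        imports.foldl (fun acc _import =>
          if PySem.Str.startswith _import namespace_ then acc ++ [file] else acc) not_allowed) acc
    = acc ++ List.replicate
        ((disallowed.countP (fun x => PySem.Str.startswith current_file_module_name x))
          * (imports.countP (fun x => PySem.Str.startswith x namespace_))) file := by
  induction disallowed generalizing acc with
  | nil => simp
  | cons hd tl ih =>
    rw [List.foldl_cons, List.countP_cons]
    by_cases h : PySem.Str.startswith current_file_module_name hd
    · rw [if_neg (not_not_intro h), inner_foldl_eq, ih, List.append_assoc, ← List.replicate_add]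
      simp only [h, if_true]
      congr 1
      ring
    · rw [if_pos h, ih]
      simp only [h, Bool.false_eq_true, if_false, Nat.add_zero]

-- ===== VERDICT (by name: the statement is the Claim_ definition above) =====
theorem check_disallowed_spec : Claim_equal_check_disallowed := by
  intro file m ns imports disallowed _
  unfold Spec_check_disallowed check_disallowed check_disallowed_alt
  rw [outer_foldl_eq]
  simp
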